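-- pv_equiv track=rewrite | github.com/HEYWEEN/lantern | lantern/parser.py | _heading_level
-- ===== SOURCE A (Python) =====
-- def _heading_level(line: str) -> int:
--     n = 0
--     for ch in line:
--         if ch == "#":
--             n += 1
--         else:
--             break
--     if n == 0:
--         return 0
--     rest = line[n:]
--     if rest and rest[0] not in (" ", "\t"):
--         return 0
--     return n
-- ===== SOURCE B (Python) =====
-- def _heading_level(line: str) -> int:
--     head = line.replace("\t", " ").split(" ", 1)[0]
--     return len(head) if head and not head.strip("#") else 0
-- ===== Notes on version B (the rewrite author's own statement) =====
-- stated objective: simpler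
-- what changed: Instead of counting leading '#' and then checking the boundary character, B splits the line at the first space/tab and validates that the first token is a nonempty all-'#' run, returning its length.
import Mathlib
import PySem

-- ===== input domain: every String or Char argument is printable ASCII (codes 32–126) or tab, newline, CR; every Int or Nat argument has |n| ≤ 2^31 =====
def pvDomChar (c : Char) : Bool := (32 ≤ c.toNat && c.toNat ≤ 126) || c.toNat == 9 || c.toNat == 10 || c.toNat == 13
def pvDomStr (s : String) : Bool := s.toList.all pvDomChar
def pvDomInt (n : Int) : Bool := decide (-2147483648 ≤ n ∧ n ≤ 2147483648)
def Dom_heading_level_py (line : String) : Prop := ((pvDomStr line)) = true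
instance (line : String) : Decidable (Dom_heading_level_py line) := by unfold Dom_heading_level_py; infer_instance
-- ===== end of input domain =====

-- B splits the line at the first space/tab and validates that the first token is a
-- nonempty all-'#' run, instead of A's count-leading-hashes-then-check-boundary
-- (objective: simpler; same cost).

-- ===== PORT A =====
-- A's for-loop with break: count leading '#' recursively (break = stop at first non-'#')
def pvALoop : List Char → Int
  | [] => 0
  | c :: cs => if c = '#' then 1 + pvALoop cs else 0

def heading_level_py (line : String) : Int :=
  let n := pvALoop line.toList
  if n = 0 then 0
  else
    let rest := PySem.List.slice line.toList (some n) none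
    match rest with
    | [] => n
    | c :: _ => if c ≠ ' ' ∧ c ≠ '\t' then 0 else n

-- ===== PORT B =====
-- line.replace("\t", " ") : per-character map (tab → space)
-- .split(" ", 1)[0]       : the prefix before the first space
-- head.strip("#")         : drop '#' from both ends; Python truthiness 'not …' = emptiness
def pvStripHash (s : List Char) : List Char :=
  ((s.dropWhile (· = '#')).reverse.dropWhile (· = '#')).reverse

def heading_level_py_alt (line : String) : Int :=
  let head := (line.toList.map (fun c => if c = '\t' then ' ' else c)).takeWhile (· ≠ ' ')
  if head ≠ [] ∧ pvStripHash head = [] then (head.length : Int) else 0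

-- ===== PRECONDITION & SPEC =====
def Spec_heading_level_py (line : String) (out : Int) : Prop := out = heading_level_py_alt line
instance (line : String) (out : Int) : Decidable (Spec_heading_level_py line out) := by unfold Spec_heading_level_py; infer_instance

-- ===== CLAIM (what is proved, stated in full; the proofs are below) =====
def Claim_equal_heading_level_py : Prop := ∀ (line : String), Dom_heading_level_py line → Spec_heading_level_py line (heading_level_py line)

-- ===== LEMMAS AND PROOFS =====
theorem pvALoop_eq_takeWhile (cs : List Char) :
    pvALoop cs = ((cs.takeWhile (· = '#')).length : Int) := by
  induction cs with
  | nil => simp [pvALoop]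
  | cons c cs ih =>
    by_cases h : c = '#' <;> simp [pvALoop, List.takeWhile, h, ih]
    omega

theorem pvStripHash_eq_nil_iff (l : List Char) :
    pvStripHash l = [] ↔ ∀ x ∈ l, x = '#' := by
  unfold pvStripHash
  constructor
  · intro h
    have h2 : (l.dropWhile (· = '#')).reverse.dropWhile (· = '#') = [] := by
      simpa using congrArg List.reverse h
    have hall : ∀ x ∈ (l.dropWhile (· = '#')).reverse, x = '#' := by
      have := List.dropWhile_eq_nil_iff.mp h2
      simpa using this
    have hnil : l.dropWhile (· = '#') = [] := by
      cases hd : l.dropWhile (· = '#') with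
      | nil => rfl
      | cons a t =>
        have ha : a ≠ '#' := by
          have := List.head?_dropWhile_not (· = '#') l
          rw [hd] at this; simpa using this
        exact absurd (hall a (by simp [hd])) ha
    have := List.dropWhile_eq_nil_iff.mp hnil
    intro x hx; simpa using this x hx
  · intro h
    have : l.dropWhile (· = '#') = [] := List.dropWhile_eq_nil_iff.mpr (by simpa using h)
    simp [this]

theorem pvMain (cs : List Char) :
    (let n := pvALoop cs;
     if n = 0 then 0
     else
       match PySem.List.slice cs (some n) none with
       | [] => n
       | c :: _ => if c ≠ ' ' ∧ c ≠ '\t' then 0 else n) =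
    (let head := (cs.map (fun c => if c = '\t' then ' ' else c)).takeWhile (· ≠ ' ');
     if head ≠ [] ∧ pvStripHash head = [] then (head.length : Int) else 0) := by
  simp only [pvALoop_eq_takeWhile]
  have hsplit : cs = cs.takeWhile (· = '#') ++ cs.dropWhile (· = '#') :=
    (List.takeWhile_append_dropWhile).symm
  set hs := cs.takeWhile (· = '#') with hhs
  set rs := cs.dropWhile (· = '#') with hrs
  have hall : ∀ x ∈ hs, x = '#' := fun x hx => by
    have := List.mem_takeWhile_imp (hhs ▸ hx); simpa using this
  have hmap : cs.map (fun c => if c = '\t' then ' ' else c) =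
      hs ++ rs.map (fun c => if c = '\t' then ' ' else c) := by
    conv_lhs => rw [hsplit]
    rw [List.map_append]
    congr 1
    conv_rhs => rw [← List.map_id hs]
    exact List.map_congr_left (fun x hx => by simp [hall x hx])
  have hallne : hs.all (fun x => decide (x ≠ ' ')) = true :=
    List.all_eq_true.mpr (fun x hx => by simp [hall x hx])
  have htws : hs.takeWhile (fun x => decide (x ≠ ' ')) = hs := by
    rw [List.takeWhile_eq_self_iff]
    intro i hi
    simp [hall i hi]
  have htw : (hs ++ rs.map (fun c => if c = '\t' then ' ' else c)).takeWhile (· ≠ ' ') =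
      hs ++ (rs.map (fun c => if c = '\t' then ' ' else c)).takeWhile (· ≠ ' ') := by
    rw [List.takeWhile_append, if_pos (by rw [htws])]
  have hslice : PySem.List.slice cs (some (hs.length : Int)) none = rs := by
    rw [PySem.List.slice_from_natCast]
    conv_lhs => rw [hsplit]
    simp
  rw [hmap, htw]
  rcases hr : rs with _ | ⟨c, t⟩
  · -- no non-'#' tail: head = hs
    simp only [List.map_nil, List.takeWhile_nil, List.append_nil]
    by_cases h0 : hs = []
    · simp [h0]
    · have : (hs.length : Int) ≠ 0 := by
        simp [List.length_eq_zero_iff]; exact h0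
      rw [if_neg this]
      rw [hr] at hslice; rw [hslice]
      rw [if_pos ⟨h0, (pvStripHash_eq_nil_iff hs).mpr hall⟩]
  · have hc : c ≠ '#' := by
      have := List.head?_dropWhile_not (· = '#') cs
      rw [← hrs, hr] at this; simpa using this
    rw [hr] at hslice
    by_cases hws : c = ' ' ∨ c = '\t'
    · -- follower is space/tab: head = hs, both return hs.length (or 0 if empty)
      have hmc : (if c = '\t' then ' ' else c) = ' ' := by
        rcases hws with h | h <;> simp [h]
      have hhead : ((c :: t).map (fun c => if c = '\t' then ' ' else c)).takeWhile
          (fun x => decide (x ≠ ' ')) = [] := by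
        simp [hmc]
      rw [hhead, List.append_nil]
      by_cases h0 : hs = []
      · simp [h0]
      · have hn : (hs.length : Int) ≠ 0 := by
          simp [List.length_eq_zero_iff]; exact h0
        rw [if_neg hn, hslice]
        show (if c ≠ ' ' ∧ c ≠ '\t' then (0 : Int) else (hs.length : Int)) = _
        rw [if_neg (by tauto : ¬(c ≠ ' ' ∧ c ≠ '\t')),
          if_pos ⟨h0, (pvStripHash_eq_nil_iff hs).mpr hall⟩]
    · -- follower invalid: head contains c ≠ '#', both return 0
      rcases not_or.mp hws with ⟨hw1, hw2⟩
      replace hws : c ≠ ' ' ∧ c ≠ '\t' := ⟨hw1, hw2⟩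
      have hmc : (if c = '\t' then ' ' else c) = c := by simp [hws.2]
      have hhead : ((c :: t).map (fun c => if c = '\t' then ' ' else c)).takeWhile
          (fun x => decide (x ≠ ' ')) =
          c :: (t.map (fun c => if c = '\t' then ' ' else c)).takeWhile (fun x => decide (x ≠ ' ')) := by
        rw [List.map_cons, hmc, List.takeWhile_cons, if_pos (decide_eq_true hws.1)]
      rw [hhead]
      set tail := (t.map (fun c => if c = '\t' then ' ' else c)).takeWhile (fun x => decide (x ≠ ' '))
      have hmem : c ∈ hs ++ c :: tail := by simp
      have hns : ¬ pvStripHash (hs ++ c :: tail) = [] := by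
        intro h
        exact hc ((pvStripHash_eq_nil_iff _).mp h c hmem)
      rw [if_neg (by tauto : ¬((hs ++ c :: tail) ≠ [] ∧ pvStripHash (hs ++ c :: tail) = []))]
      by_cases h0 : (hs.length : Int) = 0
      · simp [h0]
      · rw [if_neg h0, hslice]
        show (if c ≠ ' ' ∧ c ≠ '\t' then (0 : Int) else (hs.length : Int)) = 0
        rw [if_pos hws]

-- ===== VERDICT (by name: the statement is the Claim_ definition above) =====
theorem heading_level_py_spec : Claim_equal_heading_level_py := by
  intro line _
  unfold Spec_heading_level_py heading_level_py heading_level_py_alt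
  exact pvMain line.toList
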